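-- pv_equiv track=rewrite | github.com/AlexG31/EdreamProject | util/decode_and_split_long_lines.py | splitWord
-- ===== SOURCE A (Python) =====
-- def splitWord(line, target = 'and'):
--   result = []
--
--   phrases = []
--   words = line.split(' ')
--   for w in words:
--     if w.lower() == target:
--       result.append(' '.join(phrases))
--       phrases = []
--     phrases.append(w)
--
--   if len(phrases) > 0:
--     result.append(' '.join(phrases))
--
--   return result
-- ===== SOURCE B (Python) =====
-- def splitWord(line, target = 'and'):
--   words = line.split(' ')
--   bounds = [i for i, w in enumerate(words) if w.lower() == target]
--   prev = 0
--   result = []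
--   for b in bounds:
--     result.append(' '.join(words[prev:b]))
--     prev = b
--   result.append(' '.join(words[prev:]))
--   return result
-- ===== Notes on version B (the rewrite author's own statement) =====
-- stated objective: alternative
-- what changed: B is a staged computation: it first collects the list of boundary indices (positions whose word lowercases to the target) via enumerate, then builds each phrase by slicing the word list between consecutive boundaries, instead of A's single accumulate-and-flush pass with a conditional trailing flush.
import Mathlib
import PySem

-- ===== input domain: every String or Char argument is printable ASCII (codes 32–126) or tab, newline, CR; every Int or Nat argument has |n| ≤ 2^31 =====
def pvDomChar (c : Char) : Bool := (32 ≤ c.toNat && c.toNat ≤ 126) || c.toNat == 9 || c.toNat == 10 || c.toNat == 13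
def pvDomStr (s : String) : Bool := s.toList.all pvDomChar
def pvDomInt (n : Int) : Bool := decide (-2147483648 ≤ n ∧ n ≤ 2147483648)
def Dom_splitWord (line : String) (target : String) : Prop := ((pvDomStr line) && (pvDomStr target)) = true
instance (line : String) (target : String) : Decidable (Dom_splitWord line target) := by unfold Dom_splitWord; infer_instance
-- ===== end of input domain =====

-- B first collects the boundary indices (positions whose word lowercases to the target) and then
-- slices the word list between consecutive boundaries, instead of A's one-pass accumulate-and-flush
-- loop (objective: alternative; same cost).

-- ===== PORT A =====
def splitWord (line : String) (target : String) : List String :=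
  let words := (PySem.Chars.splitOn line.toList " ".toList).map String.mk
  let st := words.foldl (fun (st : List String × List String) w =>
    let st := if PySem.Str.lower w == target then
        (st.1 ++ [PySem.Str.join " " st.2], ([] : List String))
      else st
    (st.1, st.2 ++ [w])) ([], [])
  if st.2.length > 0 then st.1 ++ [PySem.Str.join " " st.2] else st.1

-- ===== PORT B =====
def splitWord_alt (line : String) (target : String) : List String :=
  let words := (PySem.Chars.splitOn line.toList " ".toList).map String.mk
  let bounds := ((PySem.List.enumerate words 0).filter
      (fun p => PySem.Str.lower p.2 == target)).map Prod.fst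
  let st := bounds.foldl (fun (st : Int × List String) b =>
      (b, st.2 ++ [PySem.Str.join " " (PySem.List.slice words (some st.1) (some b))])) (0, [])
  st.2 ++ [PySem.Str.join " " (PySem.List.slice words (some st.1) none)]

-- ===== PRECONDITION & SPEC =====
def Spec_splitWord (line : String) (target : String) (out : List String) : Prop := out = splitWord_alt line target
instance (line : String) (target : String) (out : List String) : Decidable (Spec_splitWord line target out) := by unfold Spec_splitWord; infer_instance

-- ===== CLAIM (what is proved, stated in full; the proofs are below) =====
def Claim_equal_splitWord : Prop := ∀ (line : String) (target : String), Dom_splitWord line target → Spec_splitWord line target (splitWord line target)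

-- ===== LEMMAS AND PROOFS =====

-- A's loop body, named for the proofs (definitionally equal to the port's lambda)
def pvStepA (target : String) (st : List String × List String) (w : String) : List String × List String :=
  let st := if PySem.Str.lower w == target then
      (st.1 ++ [PySem.Str.join " " st.2], ([] : List String))
    else st
  (st.1, st.2 ++ [w])

-- B's loop body over a fixed word list W
def pvStepB (W : List String) (st : Int × List String) (b : Int) : Int × List String :=
  (b, st.2 ++ [PySem.Str.join " " (PySem.List.slice W (some st.1) (some b))])

-- boundary indices of ws, counting from offset k
def pvBnds (target : String) (k : Nat) : List String → List Int
  | [] => []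
  | w :: ws => if PySem.Str.lower w == target then (k : Int) :: pvBnds target (k+1) ws
               else pvBnds target (k+1) ws

-- (prefix before the first target word, joined phrases from the first target word on)
def pvSp (target : String) : List String → List String × List String
  | [] => ([], [])
  | w :: ws =>
    let pg := pvSp target ws
    if PySem.Str.lower w == target then ([], PySem.Str.join " " (w :: pg.1) :: pg.2)
    else (w :: pg.1, pg.2)

theorem pvStepA_pos {target w : String} (h : (PySem.Str.lower w == target) = true)
    (st : List String × List String) :
    pvStepA target st w = (st.1 ++ [PySem.Str.join " " st.2], [w]) := by
  simp [pvStepA, h]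

theorem pvStepA_neg {target w : String} (h : ¬ (PySem.Str.lower w == target) = true)
    (st : List String × List String) :
    pvStepA target st w = (st.1, st.2 ++ [w]) := by
  simp [pvStepA, h]

theorem pv_go_ne_nil (sep : List Char) : ∀ (fuel : Nat) (l cur : List Char)
    (acc : List (List Char)), PySem.Chars.splitOn.go sep fuel l cur acc ≠ [] := by
  intro fuel
  induction fuel with
  | zero => intro l cur acc; simp [PySem.Chars.splitOn.go]
  | succ n ih =>
    intro l cur acc
    cases l with
    | nil => simp [PySem.Chars.splitOn.go]
    | cons c rest =>
      rw [PySem.Chars.splitOn.go]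
      split
      · exact ih _ _ _
      · exact ih _ _ _

theorem pv_splitOn_ne_nil (s : String) :
    (PySem.Chars.splitOn s.toList " ".toList).map String.mk ≠ [] := by
  simp only [ne_eq, List.map_eq_nil_iff]
  unfold PySem.Chars.splitOn
  exact pv_go_ne_nil _ _ _ _ _

-- after the first word, A's loop-plus-final-flush realises pvSp
theorem pvA_loop (target : String) (ws : List String) :
    ∀ (res ph : List String), ph ≠ [] →
    (if (ws.foldl (pvStepA target) (res, ph)).2.length > 0 then
        (ws.foldl (pvStepA target) (res, ph)).1 ++
          [PySem.Str.join " " (ws.foldl (pvStepA target) (res, ph)).2]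
      else (ws.foldl (pvStepA target) (res, ph)).1)
    = res ++ PySem.Str.join " " (ph ++ (pvSp target ws).1) :: (pvSp target ws).2 := by
  induction ws with
  | nil =>
    intro res ph hph
    simp [pvSp, List.length_pos_iff, hph]
  | cons w ws ih =>
    intro res ph hph
    rw [List.foldl_cons]
    by_cases h : (PySem.Str.lower w == target) = true
    · rw [pvStepA_pos h, ih _ [w] (by simp)]
      simp [pvSp, h]
    · rw [pvStepA_neg h, ih _ (ph ++ [w]) (by simp)]
      simp [pvSp, h]

-- A's whole computation on a nonempty word list equals the pvSp characterisation
theorem pvA_char (target : String) (W : List String) (hW : W ≠ []) :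
    (if (W.foldl (pvStepA target) ([], [])).2.length > 0 then
        (W.foldl (pvStepA target) ([], [])).1 ++
          [PySem.Str.join " " (W.foldl (pvStepA target) ([], [])).2]
      else (W.foldl (pvStepA target) ([], [])).1)
    = PySem.Str.join " " (pvSp target W).1 :: (pvSp target W).2 := by
  cases W with
  | nil => exact absurd rfl hW
  | cons w ws =>
    rw [List.foldl_cons]
    by_cases h : (PySem.Str.lower w == target) = true
    · rw [pvStepA_pos h, pvA_loop target ws _ [w] (by simp)]
      simp [pvSp, h]
    · rw [pvStepA_neg h, pvA_loop target ws _ ([] ++ [w]) (by simp)]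
      simp [pvSp, h]

-- enumerate-filter-map computes pvBnds
theorem pvBnds_eq (target : String) : ∀ (ws : List String) (k : Nat),
    ((PySem.List.enumerate ws (k : Int)).filter
      (fun p => PySem.Str.lower p.2 == target)).map Prod.fst = pvBnds target k ws := by
  intro ws
  induction ws with
  | nil => intro k; simp [PySem.List.enumerate_nil, pvBnds]
  | cons w ws ih =>
    intro k
    rw [PySem.List.enumerate_cons]
    have hk : (k : Int) + 1 = ((k + 1 : Nat) : Int) := by push_cast; ring
    by_cases h : (PySem.Str.lower w == target) = true
    · simp only [List.filter_cons, h, List.map_cons, pvBnds, if_true, hk, ih]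
    · simp only [List.filter_cons, h, pvBnds, Bool.false_eq_true, if_false, hk, ih]

-- B's slicing loop realises pvSp: W = v ++ u ++ ws, prev = |v|, current index = |v| + |u|
theorem pvB_loop (target : String) : ∀ (ws u v res : List String),
    (((pvBnds target (v.length + u.length) ws).foldl (pvStepB (v ++ u ++ ws))
        ((v.length : Int), res)).2 ++
      [PySem.Str.join " " (PySem.List.slice (v ++ u ++ ws)
        (some ((pvBnds target (v.length + u.length) ws).foldl (pvStepB (v ++ u ++ ws))
          ((v.length : Int), res)).1) none)])
    = res ++ PySem.Str.join " " (u ++ (pvSp target ws).1) :: (pvSp target ws).2 := by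
  intro ws
  induction ws with
  | nil =>
    intro u v res
    simp [pvBnds, pvSp, PySem.List.slice_from_natCast]
  | cons w ws ih =>
    intro u v res
    by_cases h : (PySem.Str.lower w == target) = true
    · rw [pvBnds, if_pos h, List.foldl_cons]
      have hb : pvStepB (v ++ u ++ (w :: ws)) ((v.length : Int), res)
            ((v.length + u.length : Nat) : Int)
          = ((((v ++ u).length : Nat) : Int), res ++ [PySem.Str.join " " u]) := by
        simp only [pvStepB, PySem.List.slice_natCast]
        have : (v.length + u.length) - v.length = u.length := by omega
        rw [this]
        have : v ++ u ++ (w :: ws) = v ++ (u ++ (w :: ws)) := by simp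
        rw [this, List.drop_left, List.take_left]
        simp
      rw [hb]
      have hW : v ++ u ++ (w :: ws) = (v ++ u) ++ [w] ++ ws := by simp
      have hk : v.length + u.length + 1 = (v ++ u).length + [w].length := by simp
      rw [hW, hk, ih [w] (v ++ u) (res ++ [PySem.Str.join " " u])]
      simp [pvSp, h]
    · rw [pvBnds, if_neg h]
      have hW : v ++ u ++ (w :: ws) = v ++ (u ++ [w]) ++ ws := by simp
      have hk : v.length + u.length + 1 = v.length + (u ++ [w]).length := by simp; omega
      rw [hW, hk, ih (u ++ [w]) v res]
      simp [pvSp, h]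

-- ===== VERDICT (by name: the statement is the Claim_ definition above) =====
theorem splitWord_spec : Claim_equal_splitWord := by
  intro line target _
  show _ = _
  unfold splitWord splitWord_alt
  set W := (PySem.Chars.splitOn line.toList " ".toList).map String.mk with hWdef
  have hW : W ≠ [] := pv_splitOn_ne_nil line
  have hA := pvA_char target W hW
  have hB := pvB_loop target W [] [] []
  simp only [List.nil_append, List.length_nil, Nat.cast_zero, List.append_nil] at hB
  rw [← pvBnds_eq target W 0] at hB
  simp only [Nat.cast_zero] at hB
  exact hA.trans hB.symm
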